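-- pv_equiv track=rewrite | github.com/DawitLulie/A2SV_Solved_Questions | 2553-Separate-the-Digits-in-an-Array.py | separateDigits
-- ===== SOURCE A (Python) =====
-- from typing import List
--
-- def separateDigits(nums: List[int]) -> List[int]:
--     s = ""
--     for num in nums:
--         s += str(num)
--     result = []
--     for ch in s:
--         result.append(int(ch))
--     return result
-- ===== SOURCE B (Python) =====
-- from typing import List
--
-- def _digits(n):
--     # decimal digits of n by arithmetic: recurse on n // 10, emit n % 10 last
--     return [n] if n < 10 else _digits(n // 10) + [n % 10]
--
-- def separateDigits(nums: List[int]) -> List[int]: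
--     out = []
--     for num in nums:
--         out += _digits(num)
--     return out
-- ===== Notes on version B (the rewrite author's own statement) =====
-- stated objective: alternative
-- what changed: B extracts digits arithmetically (recursive divmod by 10 building each number's digit list) instead of A's stringify-concatenate-then-parse-each-character pipeline; no strings are involved at all.
import Mathlib
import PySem

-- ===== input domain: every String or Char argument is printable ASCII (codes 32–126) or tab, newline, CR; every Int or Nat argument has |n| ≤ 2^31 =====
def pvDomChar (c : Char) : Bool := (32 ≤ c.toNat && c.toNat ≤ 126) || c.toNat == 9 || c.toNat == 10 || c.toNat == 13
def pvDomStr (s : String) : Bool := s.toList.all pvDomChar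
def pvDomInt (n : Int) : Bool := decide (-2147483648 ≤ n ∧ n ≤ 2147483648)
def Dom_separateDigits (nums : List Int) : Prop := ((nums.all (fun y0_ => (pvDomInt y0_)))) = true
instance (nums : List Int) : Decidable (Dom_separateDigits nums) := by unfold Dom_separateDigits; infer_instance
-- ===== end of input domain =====

-- B replaces A's stringify-concatenate-then-parse pipeline by arithmetic divmod digit extraction; objective: alternative.

-- ===== PORT A =====
-- int(ch) for a single character ch (ValueError = none, excluded by Pre_)
def pvDigitOf (c : Char) : Int := (PySem.Int.ofChars? [c]).getD 0

-- A: first concatenate str(num) for every num into s, then scan s appending int(ch).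
def separateDigits (nums : List Int) : List Int :=
  let s : String := nums.foldl (fun s num => s ++ PySem.Int.toStr num) ""
  s.toList.foldl (fun result ch => result ++ [pvDigitOf ch]) []

-- ===== PORT B =====
-- B's _digits: [n] if n < 10, else _digits(n // 10) + [n % 10]
def pvDigits (n : Int) : List Int :=
  if n < 10 then [n]
  else pvDigits (PySem.Int.floordiv n 10) ++ [PySem.Int.mod n 10]
termination_by n.toNat
decreasing_by
  rw [PySem.Int.floordiv_eq_ediv_of_pos (by omega : (0:Int) < 10)]
  omega

-- B: for each num, out += _digits(num)
def separateDigits_alt (nums : List Int) : List Int :=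
  nums.foldl (fun out num => out ++ pvDigits num) []

-- ===== PRECONDITION & SPEC =====
-- Pre_ excludes exactly the inputs with a negative element, where int('-') raises ValueError in A.
def Pre_separateDigits (nums : List Int) : Prop := ∀ n ∈ nums, 0 ≤ n
instance (nums : List Int) : Decidable (Pre_separateDigits nums) := by unfold Pre_separateDigits; infer_instance
def pvWitness_separateDigits : List Int := [13, 25, 0, 83]
def Spec_separateDigits (nums : List Int) (out : List Int) : Prop := out = separateDigits_alt nums
instance (nums : List Int) (out : List Int) : Decidable (Spec_separateDigits nums out) := by unfold Spec_separateDigits; infer_instance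

-- ===== CLAIM =====
def Claim_equal_separateDigits : Prop := ∀ (nums : List Int), Dom_separateDigits nums → Pre_separateDigits nums → Spec_separateDigits nums (separateDigits nums)

-- ===== LEMMAS AND PROOFS =====

-- the inner append-loop of A maps pvDigitOf over the characters, after the accumulator
theorem pv_foldl_digits (cs : List Char) (acc : List Int) :
    cs.foldl (fun result ch => result ++ [pvDigitOf ch]) acc = acc ++ cs.map pvDigitOf := by
  induction cs generalizing acc with
  | nil => simp
  | cons c cs ih => simp [List.foldl, ih]

-- A's concatenation loop, characterised on the character lists
theorem pv_concat_toList (nums : List Int) (s0 : String) :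
    (nums.foldl (fun s num => s ++ PySem.Int.toStr num) s0).toList
      = s0.toList ++ nums.flatMap (fun num => (PySem.Int.toStr num).toList) := by
  induction nums generalizing s0 with
  | nil => simp
  | cons n ns ih => simp [List.foldl, ih]

-- B's outer loop, characterised
theorem pv_alt_loop (nums : List Int) (acc : List Int) :
    nums.foldl (fun out num => out ++ pvDigits num) acc = acc ++ nums.flatMap pvDigits := by
  induction nums generalizing acc with
  | nil => simp
  | cons n ns ih => simp [List.foldl, ih]

-- Nat.toDigitsCore pushes its accumulator to the right
theorem pv_toDigitsCore_acc (b f : Nat) :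
    ∀ (n : Nat) (acc : List Char),
      Nat.toDigitsCore b f n acc = Nat.toDigitsCore b f n [] ++ acc := by
  induction f with
  | zero => intro n acc; simp [Nat.toDigitsCore]
  | succ f ih =>
    intro n acc
    simp only [Nat.toDigitsCore]
    by_cases h : n / b = 0
    · simp [h]
    · simp only [h, if_false]
      rw [ih (n / b) [Nat.digitChar (n % b)], ih (n / b) (Nat.digitChar (n % b) :: acc)]
      simp

-- any fuel larger than n computes the same digits (base 10)
theorem pv_toDigitsCore_fuel :
    ∀ (f f' n : Nat), n < f → n < f' →
      Nat.toDigitsCore 10 f n [] = Nat.toDigitsCore 10 f' n [] := by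
  intro f
  induction f with
  | zero => intro f' n h; omega
  | succ f ih =>
    intro f' n hf hf'
    cases f' with
    | zero => omega
    | succ f' =>
      simp only [Nat.toDigitsCore]
      by_cases h : n / 10 = 0
      · simp [h]
      · simp only [h, if_false]
        rw [pv_toDigitsCore_acc 10 f, pv_toDigitsCore_acc 10 f',
          ih f' (n / 10) (by omega) (by omega)]

-- recursion equation of Nat.toDigits for m ≥ 10
theorem pv_toDigits_step (m : Nat) (h : 10 ≤ m) :
    Nat.toDigits 10 m = Nat.toDigits 10 (m / 10) ++ [Nat.digitChar (m % 10)] := by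
  have h10 : m / 10 ≠ 0 := by omega
  show Nat.toDigitsCore 10 (m + 1) m [] = _
  simp only [Nat.toDigitsCore, h10, if_false]
  rw [pv_toDigitsCore_acc 10 m, pv_toDigitsCore_fuel m (m / 10 + 1) (m / 10) (by omega) (by omega)]
  rfl

-- int(digitChar d) = d for a single decimal digit
theorem pv_digitOf_digitChar (d : Nat) (h : d < 10) :
    pvDigitOf (Nat.digitChar d) = (d : Int) := by
  interval_cases d <;> decide

-- the parsed characters of str(m) are exactly B's arithmetic digits, for m : Nat
theorem pv_digits_eq (m : Nat) :
    (Nat.toDigits 10 m).map pvDigitOf = pvDigits (m : Int) := by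
  by_cases h : m < 10
  · rw [Nat.toDigits_of_lt_base h, pvDigits]
    have hm : (m : Int) < 10 := by exact_mod_cast h
    simp [hm, pv_digitOf_digitChar m h]
  · rw [pv_toDigits_step m (by omega), List.map_append, pv_digits_eq (m / 10)]
    have hlt : ¬ ((m : Int) < 10) := by exact_mod_cast h
    conv_rhs => rw [pvDigits]
    have h1 : PySem.Int.floordiv (m : Int) 10 = ((m / 10 : Nat) : Int) := by
      rw [PySem.Int.floordiv_eq_ediv_of_pos (by norm_num)]; omega
    have h2 : PySem.Int.mod (m : Int) 10 = ((m % 10 : Nat) : Int) := by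
      rw [PySem.Int.mod_eq_emod_of_pos (by norm_num)]; omega
    rw [if_neg hlt, h1, h2, List.map_singleton, pv_digitOf_digitChar (m % 10) (by omega)]
termination_by m
decreasing_by omega

-- str(n) for 0 ≤ n parses to B's digits
theorem pv_toStr_digits (n : Int) (h : 0 ≤ n) :
    ((PySem.Int.toStr n).toList).map pvDigitOf = pvDigits n := by
  rw [PySem.Int.toList_toStr]
  have hn : PySem.Int.toChars n = Nat.toDigits 10 n.toNat := by
    simp [PySem.Int.toChars, not_lt.mpr h]
  rw [hn, pv_digits_eq n.toNat, Int.toNat_of_nonneg h]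

-- ===== VERDICT =====
theorem separateDigits_spec : Claim_equal_separateDigits := by
  intro nums _ hpre
  unfold Spec_separateDigits separateDigits separateDigits_alt
  show (List.foldl (fun result ch => result ++ [pvDigitOf ch]) []
      (List.foldl (fun s num => s ++ PySem.Int.toStr num) "" nums).toList) = _
  rw [pv_concat_toList, pv_alt_loop, pv_foldl_digits]
  simp only [List.nil_append, String.toList_empty]
  rw [List.map_flatMap]
  exact List.flatMap_congr (fun n hn => pv_toStr_digits n (hpre n hn))
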